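-- pv_equiv track=rewrite | github.com/hugheste/KinovaGrasping | gym-kinova-gripper/main_DDPGfD.py | get_exp_input
-- ===== SOURCE A (Python) =====
-- def get_exp_input(exp_name, shapes, sizes):
--     """ Return the correct shapes, sizes, and orientations based on requested experiment
--     exp_name: Experiment name (sizes, shapes, orientations)
--     shapes: All shape options
--     sizes: All shape sizes
--     """
--     exp_types = exp_name.split('_')
--     exp_shapes = []
--
--     # All shapes
--     if "shapes" in exp_types and "sizes" in exp_types:
--         for size in sizes:
--             exp_shapes += [shape + size for shape in shapes]
--     elif "shapes" in exp_types:
--         exp_shapes += [shape + "S" for shape in shapes]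
--     elif "sizes" in exp_types:
--         exp_shapes += ["Cube" + size for size in sizes]
--     else:
--         exp_shapes += ["CubeS"]
--
--     # All orientations
--     if "orientations" in exp_types:
--         exp_orientation = "random"
--     else:
--         exp_orientation = "normal"
--
--     return exp_shapes, exp_orientation
-- ===== SOURCE B (Python) =====
-- def get_exp_input(exp_name, shapes, sizes):
--     """Same result via two independent option lists and one cross-product comprehension."""
--     exp_types = exp_name.split('_')
--     shape_list = shapes if "shapes" in exp_types else ["Cube"]
--     size_list = sizes if "sizes" in exp_types else ["S"]
--     exp_shapes = [shape + size for size in size_list for shape in shape_list]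
--     exp_orientation = "random" if "orientations" in exp_types else "normal"
--     return exp_shapes, exp_orientation
-- ===== Notes on version B (the rewrite author's own statement) =====
-- stated objective: simpler
-- what changed: Replaces the four-way branch over shape/size flags by two independent default lists and a single cross-product comprehension, which subsumes all four cases.
import Mathlib
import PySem

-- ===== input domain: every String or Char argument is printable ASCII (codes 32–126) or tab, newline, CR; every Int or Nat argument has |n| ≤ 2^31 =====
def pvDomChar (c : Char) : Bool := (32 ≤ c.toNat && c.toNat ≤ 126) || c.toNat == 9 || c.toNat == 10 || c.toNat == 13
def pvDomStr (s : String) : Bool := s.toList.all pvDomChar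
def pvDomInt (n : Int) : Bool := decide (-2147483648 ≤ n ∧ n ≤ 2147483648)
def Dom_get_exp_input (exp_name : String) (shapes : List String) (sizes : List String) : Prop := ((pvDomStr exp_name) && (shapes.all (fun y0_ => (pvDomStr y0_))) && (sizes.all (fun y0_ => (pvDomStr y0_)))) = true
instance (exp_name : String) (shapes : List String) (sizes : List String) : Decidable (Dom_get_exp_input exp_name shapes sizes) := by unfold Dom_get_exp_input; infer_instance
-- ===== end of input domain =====

-- B replaces A's four-way branch by two default lists and one cross-product pass (objective: simpler).

-- ===== PORT A =====
def get_exp_input (exp_name : String) (shapes : List String) (sizes : List String) : List String × String :=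
  let exp_types := (PySem.Str.split? exp_name "_").getD []
  let exp_shapes : List String :=
    if exp_types.contains "shapes" && exp_types.contains "sizes" then
      sizes.foldl (fun acc size => acc ++ shapes.map (fun shape => shape ++ size)) []
    else if exp_types.contains "shapes" then
      [] ++ shapes.map (fun shape => shape ++ "S")
    else if exp_types.contains "sizes" then
      [] ++ sizes.map (fun size => "Cube" ++ size)
    else
      [] ++ ["CubeS"]
  let exp_orientation := if exp_types.contains "orientations" then "random" else "normal"
  (exp_shapes, exp_orientation)

-- ===== PORT B =====
def get_exp_input_alt (exp_name : String) (shapes : List String) (sizes : List String) : List String × String :=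
  let exp_types := (PySem.Str.split? exp_name "_").getD []
  let shape_list := if exp_types.contains "shapes" then shapes else ["Cube"]
  let size_list := if exp_types.contains "sizes" then sizes else ["S"]
  let exp_shapes := size_list.flatMap (fun size => shape_list.map (fun shape => shape ++ size))
  let exp_orientation := if exp_types.contains "orientations" then "random" else "normal"
  (exp_shapes, exp_orientation)

-- ===== PRECONDITION & SPEC =====
def Spec_get_exp_input (exp_name : String) (shapes : List String) (sizes : List String) (out : List String × String) : Prop := out = get_exp_input_alt exp_name shapes sizes
instance (exp_name : String) (shapes : List String) (sizes : List String) (out : List String × String) : Decidable (Spec_get_exp_input exp_name shapes sizes out) := by unfold Spec_get_exp_input; infer_instance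

-- ===== CLAIM (what is proved, stated in full; the proofs are below) =====
def Claim_equal_get_exp_input : Prop := ∀ (exp_name : String) (shapes : List String) (sizes : List String), Dom_get_exp_input exp_name shapes sizes → Spec_get_exp_input exp_name shapes sizes (get_exp_input exp_name shapes sizes)

-- ===== LEMMAS AND PROOFS =====
theorem foldl_append_flatMap {α β : Type} (g : α → List β) (l : List α) (acc : List β) :
    l.foldl (fun acc x => acc ++ g x) acc = acc ++ l.flatMap g := by
  induction l generalizing acc with
  | nil => simp
  | cons x xs ih => simp [List.foldl_cons, ih, List.append_assoc]

theorem flatten_map_sing {α β : Type} (f : α → β) (l : List α) :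
    (l.map (fun x => [f x])).flatten = l.map f := by
  induction l with
  | nil => rfl
  | cons x xs ih => simp [ih]

theorem get_exp_input_eq_alt (exp_name : String) (shapes : List String) (sizes : List String) :
    get_exp_input exp_name shapes sizes = get_exp_input_alt exp_name shapes sizes := by
  unfold get_exp_input get_exp_input_alt
  set ts := (PySem.Str.split? exp_name "_").getD [] with hts
  by_cases h1 : "shapes" ∈ ts <;> by_cases h2 : "sizes" ∈ ts <;>
    simp [h1, h2, foldl_append_flatMap, List.flatMap, flatten_map_sing]

-- ===== VERDICT (by name: the statement is the Claim_ definition above) =====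
theorem get_exp_input_spec : Claim_equal_get_exp_input := by
  intro e sh sz _
  unfold Spec_get_exp_input
  exact get_exp_input_eq_alt e sh sz
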